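-- pv_equiv track=rewrite | github.com/vivekso/TUF_DSA | Increasing_Letter_Triangle_Pattern.py | Increasing_Letter_Triangle_Pattern
-- ===== SOURCE A (Python) =====
-- import string
--
-- def Increasing_Letter_Triangle_Pattern(n):
--   letter_string = list(string.ascii_uppercase)
--   pattern = ""
--   for i in range(1, n + 1):
--     for j in range(1, i + 1):
--       pattern += letter_string[j - 1]
--     pattern += "\n"
--   return pattern
-- ===== SOURCE B (Python) =====
-- import string
--
-- def Increasing_Letter_Triangle_Pattern(n):
--   letter_string = list(string.ascii_uppercase)
--   prefix = ""
--   rows = []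
--   for i in range(1, n + 1):
--     prefix += letter_string[i - 1]
--     rows.append(prefix + "\n")
--   return "".join(rows)
-- ===== Notes on version B (the rewrite author's own statement) =====
-- stated objective: alternative
-- what changed: B keeps one growing prefix string and appends prefix+'\n' per row, replacing A's nested loop that rebuilds each row character-by-character from the start; O(n^2) character-appends become O(n) appends (output itself is Theta(n^2)).
import Mathlib
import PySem

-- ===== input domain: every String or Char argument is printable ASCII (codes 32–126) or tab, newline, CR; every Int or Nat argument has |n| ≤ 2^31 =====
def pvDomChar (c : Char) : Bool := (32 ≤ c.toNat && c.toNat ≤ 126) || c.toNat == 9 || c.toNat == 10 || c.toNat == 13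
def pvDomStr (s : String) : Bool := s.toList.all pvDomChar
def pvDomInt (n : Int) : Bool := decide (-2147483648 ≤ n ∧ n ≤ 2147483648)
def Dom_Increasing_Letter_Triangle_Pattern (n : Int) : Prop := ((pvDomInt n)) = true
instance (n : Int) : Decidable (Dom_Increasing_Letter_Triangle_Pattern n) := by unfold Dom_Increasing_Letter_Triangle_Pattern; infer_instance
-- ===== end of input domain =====

-- B replaces A's nested loop (each row rebuilt character-by-character) with a single loop
-- maintaining one growing prefix; alternative decomposition, same return value on Pre_.


-- ===== PORT A =====
-- list(string.ascii_uppercase)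
def pvLetters : List Char :=
  ['A','B','C','D','E','F','G','H','I','J','K','L','M',
   'N','O','P','Q','R','S','T','U','V','W','X','Y','Z']

-- letter_string[j-1] is total under Pre_ (1 ≤ j ≤ i ≤ n ≤ 26); default never used there
def Increasing_Letter_Triangle_Pattern (n : Int) : String :=
  String.ofList
    ((PySem.List.pyRange 1 (n + 1) 1).foldl
      (fun pattern i =>
        ((PySem.List.pyRange 1 (i + 1) 1).foldl
          (fun p j => p ++ [PySem.List.pyGetD pvLetters (j - 1) ' ']) pattern) ++ ['\n'])
      [])

-- ===== PORT B =====
def Increasing_Letter_Triangle_Pattern_alt (n : Int) : String :=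
  let st :=
    (PySem.List.pyRange 1 (n + 1) 1).foldl
      (fun (s : List Char × List (List Char)) i =>
        let prefix' := s.1 ++ [PySem.List.pyGetD pvLetters (i - 1) ' ']
        (prefix', s.2 ++ [prefix' ++ ['\n']]))
      ([], [])
  String.ofList st.2.flatten   -- "".join(rows)

-- ===== PRECONDITION & SPEC =====
-- Pre_ excludes n > 26, where Python A raises IndexError (letter_string[j-1] with j-1 ≥ 26).
def Pre_Increasing_Letter_Triangle_Pattern (n : Int) : Prop := n ≤ 26
instance (n : Int) : Decidable (Pre_Increasing_Letter_Triangle_Pattern n) := by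
  unfold Pre_Increasing_Letter_Triangle_Pattern; infer_instance
def pvWitness_Increasing_Letter_Triangle_Pattern : Int := 5

def Spec_Increasing_Letter_Triangle_Pattern (n : Int) (out : String) : Prop := out = Increasing_Letter_Triangle_Pattern_alt n
instance (n : Int) (out : String) : Decidable (Spec_Increasing_Letter_Triangle_Pattern n out) := by unfold Spec_Increasing_Letter_Triangle_Pattern; infer_instance

-- ===== CLAIM (what is proved, stated in full; the proofs are below) =====
def Claim_equal_Increasing_Letter_Triangle_Pattern : Prop := ∀ (n : Int), Dom_Increasing_Letter_Triangle_Pattern n → Pre_Increasing_Letter_Triangle_Pattern n → Spec_Increasing_Letter_Triangle_Pattern n (Increasing_Letter_Triangle_Pattern n)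

-- ===== LEMMAS AND PROOFS =====

-- the letter appended for loop index v
def pvG (v : Int) : Char := PySem.List.pyGetD pvLetters (v - 1) ' '

-- joint loop invariant over range(1, m+1): B's prefix is the map of pvG over the range,
-- and the flattened rows equal A's accumulated pattern.
theorem pv_inv (m : Nat) :
    ((PySem.List.pyRange 1 ((m : Int) + 1) 1).foldl
        (fun (s : List Char × List (List Char)) i =>
          let prefix' := s.1 ++ [PySem.List.pyGetD pvLetters (i - 1) ' ']
          (prefix', s.2 ++ [prefix' ++ ['\n']]))
        ([], [])).1
      = (PySem.List.pyRange 1 ((m : Int) + 1) 1).map pvG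
    ∧
    ((PySem.List.pyRange 1 ((m : Int) + 1) 1).foldl
        (fun (s : List Char × List (List Char)) i =>
          let prefix' := s.1 ++ [PySem.List.pyGetD pvLetters (i - 1) ' ']
          (prefix', s.2 ++ [prefix' ++ ['\n']]))
        ([], [])).2.flatten
      = (PySem.List.pyRange 1 ((m : Int) + 1) 1).foldl
          (fun pattern i =>
            ((PySem.List.pyRange 1 (i + 1) 1).foldl
              (fun p j => p ++ [PySem.List.pyGetD pvLetters (j - 1) ' ']) pattern) ++ ['\n'])
          [] := by
  induction m with
  | zero => simp [PySem.List.pyRange_one_eq_nil]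
  | succ k ih =>
    obtain ⟨ih1, ih2⟩ := ih
    have hsplit : PySem.List.pyRange 1 (((k : Int) + 1) + 1) 1
        = PySem.List.pyRange 1 ((k : Int) + 1) 1 ++ [(k : Int) + 1] :=
      PySem.List.pyRange_one_succ_right (by omega)
    push_cast
    rw [hsplit]
    simp only [List.foldl_append, List.map_append, List.foldl_cons, List.foldl_nil,
      List.map_cons, List.map_nil]
    constructor
    · rw [ih1]; rfl
    · -- rows side
      rw [ih1, List.flatten_append, ih2]
      simp only [List.flatten_cons, List.flatten_nil, List.append_nil]
      -- A's inner row over range(1, k+2) starting from the accumulated pattern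
      rw [PySem.List.foldl_append_singleton_eq_map
            (fun j => PySem.List.pyGetD pvLetters (j - 1) ' ')
            (PySem.List.pyRange 1 ((k : Int) + 1 + 1)) _]
      rw [hsplit]
      simp [pvG, List.append_assoc]

theorem Increasing_Letter_Triangle_Pattern_spec_aux (n : Int) :
    Increasing_Letter_Triangle_Pattern n = Increasing_Letter_Triangle_Pattern_alt n := by
  unfold Increasing_Letter_Triangle_Pattern Increasing_Letter_Triangle_Pattern_alt
  by_cases h : n ≤ 0
  · rw [PySem.List.pyRange_one_eq_nil (by omega)]
    rfl
  · obtain ⟨m, hm⟩ : ∃ m : Nat, n = (m : Int) := ⟨n.toNat, by omega⟩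
    subst hm
    have := (pv_inv m).2
    simp only []
    rw [this]

-- ===== VERDICT (by name: the statement is the Claim_ definition above) =====
theorem Increasing_Letter_Triangle_Pattern_spec : Claim_equal_Increasing_Letter_Triangle_Pattern := by
  intro n _ _
  unfold Spec_Increasing_Letter_Triangle_Pattern
  exact Increasing_Letter_Triangle_Pattern_spec_aux n
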